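-- pv_equiv track=rewrite | github.com/mikemoraned/tautona | messages.py | remove_single_occurrences
-- ===== SOURCE A (Python) =====
-- from collections import defaultdict
--
-- def remove_single_occurrences(texts):
--     frequency = defaultdict(int)
--     for text in texts:
--         for token in text:
--             frequency[token] += 1
--
--     texts = [[token for token in text if frequency[token] > 1]
--              for text in texts]
--     return texts
-- ===== SOURCE B (Python) =====
-- def remove_single_occurrences(texts):
--     tokens = sorted(token for text in texts for token in text)
--     duplicates = {a for a, b in zip(tokens, tokens[1:]) if a == b}
--     return [[token for token in text if token in duplicates]
--             for text in texts]
-- ===== Notes on version B (the rewrite author's own statement) =====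
-- stated objective: alternative
-- what changed: Replaces the frequency-count dict with sort-then-scan: flatten and sort all tokens, collect the duplicate set from equal adjacent pairs of the sorted list, then filter each text by duplicate-set membership instead of comparing a per-token count to 1.
import Mathlib
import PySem

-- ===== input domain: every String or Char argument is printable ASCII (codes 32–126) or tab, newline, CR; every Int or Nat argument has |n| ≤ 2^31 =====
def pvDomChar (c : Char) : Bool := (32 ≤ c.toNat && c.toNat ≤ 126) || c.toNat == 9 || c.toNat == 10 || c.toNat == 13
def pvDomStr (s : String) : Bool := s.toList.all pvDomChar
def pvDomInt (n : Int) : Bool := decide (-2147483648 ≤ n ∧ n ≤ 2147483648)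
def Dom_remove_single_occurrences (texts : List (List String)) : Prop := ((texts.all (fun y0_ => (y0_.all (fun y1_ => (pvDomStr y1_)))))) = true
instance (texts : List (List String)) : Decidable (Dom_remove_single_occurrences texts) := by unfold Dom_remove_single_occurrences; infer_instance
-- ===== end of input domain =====

-- B replaces the frequency dict with sort-then-scan (duplicates from equal adjacent pairs of the sorted token list); alternative algorithm, not faster.


-- ===== PORT A =====
def remove_single_occurrences (texts : List (List String)) : List (List String) :=
  let frequency : PySem.Dict String Int :=
    texts.foldl (fun d text => text.foldl (fun d token => d.modify token 0 (· + 1)) d) PySem.Dict.empty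
  texts.map (fun text => text.filter (fun token => frequency.getD token 0 > 1))

-- ===== PORT B =====
def remove_single_occurrences_alt (texts : List (List String)) : List (List String) :=
  let tokens := PySem.List.sorted (texts.flatMap (fun text => text)) (fun x => x) false
  let duplicates : PySem.Set String :=
    PySem.Set.ofList (((tokens.zip tokens.tail).filter (fun p => p.1 == p.2)).map (fun p => p.1))
  texts.map (fun text => text.filter (fun token => duplicates.contains token))

-- ===== PRECONDITION & SPEC =====
def Spec_remove_single_occurrences (texts : List (List String)) (out : List (List String)) : Prop := out = remove_single_occurrences_alt texts
instance (texts : List (List String)) (out : List (List String)) : Decidable (Spec_remove_single_occurrences texts out) := by unfold Spec_remove_single_occurrences; infer_instance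

-- ===== CLAIM =====
def Claim_equal_remove_single_occurrences : Prop := ∀ (texts : List (List String)), Dom_remove_single_occurrences texts → Spec_remove_single_occurrences texts (remove_single_occurrences texts)

-- ===== LEMMAS AND PROOFS =====

-- In a ≤-sorted list, a value heads an equal adjacent pair iff it occurs at least twice.
theorem adjDup_iff_count (s : List String) (hs : s.Pairwise (· ≤ ·)) (t : String) :
    (t ∈ ((s.zip s.tail).filter (fun p => p.1 == p.2)).map (fun p => p.1)) ↔ 2 ≤ s.count t := by
  induction s with
  | nil => simp
  | cons a rest ih =>
    cases rest with
    | nil =>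
      simp only [List.tail_cons, List.zip_nil_right, List.filter_nil, List.map_nil,
        List.not_mem_nil, false_iff, List.count_cons, List.count_nil, not_le]
      by_cases h : a == t <;> simp [h]
    | cons b rest' =>
      have hab : a ≤ b := (List.pairwise_cons.mp hs).1 b (by simp)
      have hs' : (b :: rest').Pairwise (· ≤ ·) := (List.pairwise_cons.mp hs).2
      have ih' := ih hs'
      simp only [List.tail_cons] at ih' ⊢
      simp only [List.zip_cons_cons, List.filter_cons]
      by_cases hab' : a = b
      · subst hab'
        simp only [beq_self_eq_true, if_true, List.map_cons, List.mem_cons]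
        rw [ih']
        by_cases hta : t = a
        · subst hta
          simp only [List.count_cons_self, true_or, true_iff]
          omega
        · have h1 : (a :: a :: rest').count t = (a :: rest').count t := by
            rw [List.count_cons_of_ne (fun h => hta h.symm)]
          rw [h1]
          simp [hta]
      · have hf : ((a, b).1 == (a, b).2) = false := by simpa using hab'
        rw [hf]
        simp only [Bool.false_eq_true, if_false]
        rw [ih']
        by_cases hta : t = a
        · subst hta
          have hlt : t < b := lt_of_le_of_ne hab hab'
          have hnotin : t ∉ b :: rest' := by
            intro hmem
            rcases List.mem_cons.mp hmem with h | h
            · exact hab' h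
            · exact absurd ((List.pairwise_cons.mp hs').1 t h) (not_le.mpr hlt)
          have hc0 : (b :: rest').count t = 0 := List.count_eq_zero.mpr hnotin
          rw [hc0, List.count_cons_self, hc0]
          omega
        · rw [List.count_cons_of_ne (fun h => hta h.symm)]

theorem remove_single_occurrences_spec : Claim_equal_remove_single_occurrences := by
  intro texts _
  unfold Spec_remove_single_occurrences remove_single_occurrences remove_single_occurrences_alt
  simp only [← List.foldl_flatten]
  apply List.map_congr_left
  intro text _
  apply List.filter_congr
  intro token _
  rw [PySem.Dict.getD_foldl_modify_add_one]
  have hflat : texts.flatMap (fun text => text) = texts.flatten := by simp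
  rw [hflat]
  set s := PySem.List.sorted texts.flatten (fun x => x) false with hsdef
  have hpair : s.Pairwise (· ≤ ·) :=
    PySem.List.sorted_pairwise (xs := texts.flatten) (key := fun x => x)
  have hcount : s.count token = texts.flatten.count token :=
    (PySem.List.sorted_perm _ _ _).count_eq token
  have hadj := adjDup_iff_count s hpair token
  rw [hcount] at hadj
  have hmem : ((PySem.Set.ofList (((s.zip s.tail).filter (fun p => p.1 == p.2)).map (fun p => p.1))).contains token)
      = decide (2 ≤ texts.flatten.count token) := by
    simp only [PySem.Set.contains_eq_listContains, List.contains_eq_mem, PySem.Set.mem_ofList]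
    exact decide_eq_decide.mpr hadj
  rw [hmem]
  rcases Nat.lt_or_ge (texts.flatten.count token) 2 with hc | hc
  · have h1 : ¬ ((0 : Int) + texts.flatten.count token > 1) := by omega
    have h2 : ¬ (2 ≤ texts.flatten.count token) := by omega
    simp [h2]
    omega
  · have h1 : ((0 : Int) + texts.flatten.count token > 1) := by omega
    simp [hc]
    omega
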